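-- pv_equiv track=rewrite | github.com/hakaraman/Daily_Python | 20200918.py | max_overlapping2
-- ===== SOURCE A (Python) =====
-- def max_overlapping2(lst):
--     #lst.sort()
--     maxrooms = 1
--     for i in range(len(lst)-1):
--         overlap_left, overlap_right = 1 , 1
--         for j in range(i+1,len(lst)):
--             if (lst[i][0] in range(lst[j][0],lst[j][1])):
--                 overlap_left += 1
--             if (lst[i][1] in range(lst[j][0],lst[j][1])):
--                 overlap_right += 1
--         if max(overlap_left, overlap_right) > maxrooms:
--             maxrooms = max(overlap_left, overlap_right)
--     return maxrooms
-- ===== SOURCE B (Python) =====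
-- def _bisect_right(xs, p):
--     lo, hi = 0, len(xs)
--     while lo < hi:
--         mid = (lo + hi) // 2
--         if xs[mid] <= p:
--             lo = mid + 1
--         else:
--             hi = mid
--     return lo
--
--
-- def max_overlapping2(lst):
--     n = len(lst)
--     if n < 2:
--         return 1
--     starts, ends = [], []   # sorted start/end points of non-empty intervals seen so far (later indices)
--     best = 1
--     for i in range(n - 1, -1, -1):
--         a, b = lst[i][0], lst[i][1]
--         cl = 1 + _bisect_right(starts, a) - _bisect_right(ends, a)
--         cr = 1 + _bisect_right(starts, b) - _bisect_right(ends, b)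
--         if cl > best:
--             best = cl
--         if cr > best:
--             best = cr
--         if a < b:
--             starts.insert(_bisect_right(starts, a), a)
--             ends.insert(_bisect_right(ends, b), b)
--     return best
-- ===== Notes on version B (the rewrite author's own statement) =====
-- stated objective: faster
-- what changed: Replaces the O(n^2) nested stabbing scans by a single right-to-left sweep that maintains two sorted lists of the later intervals' start and end points and answers each stabbing query as a difference of two hand-written binary searches (count of starts <= p minus count of ends <= p), inserting each non-empty interval's endpoints at their binary-search positions.
import Mathlib
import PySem

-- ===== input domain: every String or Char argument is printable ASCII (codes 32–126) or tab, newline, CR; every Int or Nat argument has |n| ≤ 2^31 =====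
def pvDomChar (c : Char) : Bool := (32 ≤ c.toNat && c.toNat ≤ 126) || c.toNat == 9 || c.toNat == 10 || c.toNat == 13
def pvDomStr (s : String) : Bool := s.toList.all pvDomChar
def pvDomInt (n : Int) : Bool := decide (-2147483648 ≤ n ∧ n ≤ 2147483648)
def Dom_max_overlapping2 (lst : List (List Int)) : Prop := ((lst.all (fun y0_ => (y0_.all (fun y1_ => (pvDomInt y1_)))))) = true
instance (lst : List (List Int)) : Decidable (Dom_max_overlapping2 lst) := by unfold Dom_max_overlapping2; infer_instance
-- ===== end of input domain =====

-- B replaces A's O(n^2) nested stabbing scans by one right-to-left sweep over the intervals that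
-- maintains two sorted endpoint lists and answers each stabbing query as a difference of two
-- binary searches (measured faster by a large constant factor at the tested sizes).


-- ===== PORT A =====
-- literal transliteration of A; 'x in range(a, b)' is ported as the proposition a ≤ x ∧ x < b,
-- which is exactly Python's O(1) membership test on a step-1 range (PySem.List.mem_pyRange_one).
def max_overlapping2 (lst : List (List Int)) : Int :=
  (PySem.List.pyRange 0 ((lst.length : Int) - 1) 1).foldl
    (fun maxrooms i =>
      let ov := (PySem.List.pyRange (i + 1) (lst.length : Int) 1).foldl
        (fun (ov : Int × Int) j =>
          let lj := PySem.List.pyGetD lst j []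
          ( if PySem.List.pyGetD lj 0 0 ≤ PySem.List.pyGetD (PySem.List.pyGetD lst i []) 0 0 ∧
               PySem.List.pyGetD (PySem.List.pyGetD lst i []) 0 0 < PySem.List.pyGetD lj 1 0
            then ov.1 + 1 else ov.1,
            if PySem.List.pyGetD lj 0 0 ≤ PySem.List.pyGetD (PySem.List.pyGetD lst i []) 1 0 ∧
               PySem.List.pyGetD (PySem.List.pyGetD lst i []) 1 0 < PySem.List.pyGetD lj 1 0
            then ov.2 + 1 else ov.2 ))
        (1, 1)
      if max ov.1 ov.2 > maxrooms then max ov.1 ov.2 else maxrooms)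
    1

-- ===== PORT B =====
-- transliteration of Source B's hand-written _bisect_right (while lo < hi binary search)
def pvBR (xs : List Int) (p : Int) (lo hi : Int) : Int :=
  if h : lo < hi then
    let mid := PySem.Int.floordiv (lo + hi) 2
    if PySem.List.pyGetD xs mid 0 ≤ p then pvBR xs p (mid + 1) hi
    else pvBR xs p lo mid
  else lo
termination_by (hi - lo).toNat
decreasing_by
  · have h0 := PySem.Int.floordiv_two_mid_bounds (le_of_lt h)
    have h2 : PySem.Int.floordiv (lo + hi) 2 < hi :=
      (PySem.Int.floordiv_lt_iff_lt_mul (by omega)).mpr (by omega)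
    omega
  · have h2 : PySem.Int.floordiv (lo + hi) 2 < hi :=
      (PySem.Int.floordiv_lt_iff_lt_mul (by omega)).mpr (by omega)
    omega

-- transliteration of Source B's main loop: right-to-left sweep with sorted endpoint lists
def max_overlapping2_alt (lst : List (List Int)) : Int :=
  if (lst.length : Int) < 2 then 1
  else
    ((PySem.List.pyRange ((lst.length : Int) - 1) (-1) (-1)).foldl
      (fun (st : List Int × List Int × Int) i =>
        let starts := st.1
        let ends := st.2.1
        let best := st.2.2
        let li := PySem.List.pyGetD lst i []
        let a := PySem.List.pyGetD li 0 0
        let b := PySem.List.pyGetD li 1 0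
        let cl := 1 + pvBR starts a 0 (starts.length : Int) - pvBR ends a 0 (ends.length : Int)
        let cr := 1 + pvBR starts b 0 (starts.length : Int) - pvBR ends b 0 (ends.length : Int)
        let best := if cl > best then cl else best
        let best := if cr > best then cr else best
        if a < b then
          (PySem.List.insert starts (pvBR starts a 0 (starts.length : Int)) a,
           PySem.List.insert ends (pvBR ends b 0 (ends.length : Int)) b, best)
        else (starts, ends, best))
      ([], [], 1)).2.2

-- ===== PRECONDITION & SPEC =====
-- Pre_: with at least two rows Python A reads lst[i][0] and lst[i][1] of every row, so any row
-- shorter than 2 makes A raise IndexError (with 0 or 1 rows A touches nothing and returns 1).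
def Pre_max_overlapping2 (lst : List (List Int)) : Prop :=
  lst.length ≤ 1 ∨ ∀ l ∈ lst, 2 ≤ l.length
instance (lst : List (List Int)) : Decidable (Pre_max_overlapping2 lst) := by
  unfold Pre_max_overlapping2; infer_instance

def pvWitness_max_overlapping2 : List (List Int) := [[0, 2], [1, 3], [2, 4]]

def Spec_max_overlapping2 (lst : List (List Int)) (out : Int) : Prop := out = max_overlapping2_alt lst
instance (lst : List (List Int)) (out : Int) : Decidable (Spec_max_overlapping2 lst out) := by
  unfold Spec_max_overlapping2; infer_instance

-- ===== CLAIM (what is proved, stated in full; the proofs are below) =====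
def Claim_equal_max_overlapping2 : Prop := ∀ (lst : List (List Int)), Dom_max_overlapping2 lst → Pre_max_overlapping2 lst → Spec_max_overlapping2 lst (max_overlapping2 lst)

-- ===== LEMMAS AND PROOFS =====

-- shorthand for the two endpoints of a row and the stabbing count of a tail
def pvL (l : List Int) : Int := PySem.List.pyGetD l 0 0
def pvR (l : List Int) : Int := PySem.List.pyGetD l 1 0
def pvCnt (tl : List (List Int)) (p : Int) : Int :=
  (tl.countP (fun l => decide (pvL l ≤ p ∧ p < pvR l)) : Int)
def pvKeep (l : List Int) : Bool := decide (pvL l < pvR l)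
-- the value A contributes at outer index i
def pvF (lst : List (List Int)) (i : Int) : Int :=
  max (1 + pvCnt (lst.drop (i + 1).toNat) (pvL (PySem.List.pyGetD lst i [])))
      (1 + pvCnt (lst.drop (i + 1).toNat) (pvR (PySem.List.pyGetD lst i [])))

-- a list whose first k elements are ≤ p and the rest > p has exactly k elements ≤ p
lemma pv_countP_boundary (xs : List Int) (p : Int) (k : Nat) (hk : k ≤ xs.length)
    (h1 : ∀ j (hj : j < xs.length), j < k → xs[j] ≤ p)
    (h2 : ∀ j (hj : j < xs.length), k ≤ j → p < xs[j]) :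
    xs.countP (fun v => decide (v ≤ p)) = k := by
  have hsplit : xs.countP (fun v => decide (v ≤ p))
      = (xs.take k).countP (fun v => decide (v ≤ p)) +
        (xs.drop k).countP (fun v => decide (v ≤ p)) := by
    rw [← List.countP_append, List.take_append_drop]
  have htake : (xs.take k).countP (fun v => decide (v ≤ p)) = k := by
    have hall : ∀ a ∈ xs.take k, (fun v => decide (v ≤ p)) a = true := by
      intro a ha
      obtain ⟨i, hi, rfl⟩ := List.mem_iff_getElem.mp ha
      have hik : i < k := by have := hi; simp [List.length_take] at this; omega
      have hix : i < xs.length := by omega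
      have : (xs.take k)[i] = xs[i] := List.getElem_take
      rw [this]; simpa using h1 i hix hik
    rw [List.countP_eq_length.mpr hall, List.length_take]; omega
  have hdrop : (xs.drop k).countP (fun v => decide (v ≤ p)) = 0 := by
    apply List.countP_eq_zero.mpr
    intro a ha
    obtain ⟨i, hi, rfl⟩ := List.mem_iff_getElem.mp ha
    have hix : k + i < xs.length := by have := hi; simp [List.length_drop] at this; omega
    have : (xs.drop k)[i] = xs[k + i] := by simp
    rw [this]; simpa using not_le.mpr (h2 (k + i) hix (by omega))
  omega

-- the binary search returns the boundary index
lemma pvBR_inv (xs : List Int) (p : Int) (hs : xs.Pairwise (· ≤ ·)) :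
    ∀ (fuel : Nat) (lo hi : Int), 0 ≤ lo → lo ≤ hi → hi ≤ (xs.length : Int) →
    (hi - lo).toNat ≤ fuel →
    (∀ j (hj : j < xs.length), (j : Int) < lo → xs[j] ≤ p) →
    (∀ j (hj : j < xs.length), hi ≤ (j : Int) → p < xs[j]) →
    ∃ r : Nat, pvBR xs p lo hi = (r : Int) ∧ r ≤ xs.length ∧
      (∀ j (hj : j < xs.length), j < r → xs[j] ≤ p) ∧
      (∀ j (hj : j < xs.length), r ≤ j → p < xs[j]) := by
  have hsg := List.pairwise_iff_getElem.mp hs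
  intro fuel
  induction fuel with
  | zero =>
    intro lo hi h0 hlh hhl hf hlow hhigh
    have heq : lo = hi := by omega
    rw [pvBR, dif_neg (by omega)]
    refine ⟨lo.toNat, by omega, by omega, ?_, ?_⟩
    · intro j hj hjr; exact hlow j hj (by omega)
    · intro j hj hjr; exact hhigh j hj (by omega)
  | succ n IH =>
    intro lo hi h0 hlh hhl hf hlow hhigh
    by_cases hlt : lo < hi
    · have hb := PySem.Int.floordiv_two_mid_bounds (le_of_lt hlt)
      have hmlt : PySem.Int.floordiv (lo + hi) 2 < hi :=
        (PySem.Int.floordiv_lt_iff_lt_mul (by omega)).mpr (by omega)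
      have hmnn : 0 ≤ PySem.Int.floordiv (lo + hi) 2 := by omega
      have hmlen : (PySem.Int.floordiv (lo + hi) 2).toNat < xs.length := by omega
      have hget : PySem.List.pyGetD xs (PySem.Int.floordiv (lo + hi) 2) 0
          = xs[(PySem.Int.floordiv (lo + hi) 2).toNat] :=
        PySem.List.pyGetD_eq_getElem xs 0 hmnn (by omega)
      rw [pvBR, dif_pos hlt]
      simp only []
      by_cases hc : PySem.List.pyGetD xs (PySem.Int.floordiv (lo + hi) 2) 0 ≤ p
      · rw [if_pos hc]
        refine IH (PySem.Int.floordiv (lo + hi) 2 + 1) hi (by omega) (by omega) (by omega)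
          (by omega) ?_ hhigh
        intro j hj hjm
        rcases Nat.lt_or_ge j (PySem.Int.floordiv (lo + hi) 2).toNat with hlt2 | hge2
        · rcases lt_or_ge (j : Int) lo with hl | hl
          · exact hlow j hj hl
          · exact le_trans (hsg j _ hj hmlen hlt2) (hget ▸ hc)
        · have : j = (PySem.Int.floordiv (lo + hi) 2).toNat := by omega
          subst this; exact hget ▸ hc
      · rw [if_neg hc]
        refine IH lo (PySem.Int.floordiv (lo + hi) 2) (by omega) (by omega) (by omega)
          (by omega) hlow ?_
        intro j hj hjm
        rcases Nat.lt_or_ge (PySem.Int.floordiv (lo + hi) 2).toNat j with hgt2 | hle2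
        · exact lt_of_lt_of_le (not_le.mp (hget ▸ hc)) (hsg _ j hmlen hj hgt2)
        · have : j = (PySem.Int.floordiv (lo + hi) 2).toNat := by omega
          subst this; exact not_le.mp (hget ▸ hc)
    · rw [pvBR, dif_neg hlt]
      refine ⟨lo.toNat, by omega, by omega, ?_, ?_⟩
      · intro j hj hjr; exact hlow j hj (by omega)
      · intro j hj hjr; exact hhigh j hj (by omega)

lemma pvBR_boundary (xs : List Int) (p : Int) (hs : xs.Pairwise (· ≤ ·)) :
    ∃ r : Nat, pvBR xs p 0 (xs.length : Int) = (r : Int) ∧ r ≤ xs.length ∧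
      (∀ j (hj : j < xs.length), j < r → xs[j] ≤ p) ∧
      (∀ j (hj : j < xs.length), r ≤ j → p < xs[j]) := by
  refine pvBR_inv xs p hs (xs.length + 1) 0 (xs.length : Int) le_rfl (by positivity) le_rfl
    (by omega) (fun j hj h => by omega) (fun j hj h => by exact absurd h (by omega))

-- on a sorted list the binary search counts the elements ≤ p
lemma pvBR_count (xs : List Int) (p : Int) (hs : xs.Pairwise (· ≤ ·)) :
    pvBR xs p 0 (xs.length : Int) = (xs.countP (fun v => decide (v ≤ p)) : Int) := by
  obtain ⟨r, hr, hrle, h1, h2⟩ := pvBR_boundary xs p hs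
  rw [hr, pv_countP_boundary xs p r hrle h1 h2]

-- inserting x at its bisect position keeps the list sorted and is a permutation of x :: xs
lemma pv_insert_sorted (xs : List Int) (x : Int) (hs : xs.Pairwise (· ≤ ·)) :
    (PySem.List.insert xs (pvBR xs x 0 (xs.length : Int)) x).Pairwise (· ≤ ·) ∧
    (PySem.List.insert xs (pvBR xs x 0 (xs.length : Int)) x).Perm (x :: xs) := by
  obtain ⟨r, hr, hrle, h1, h2⟩ := pvBR_boundary xs x hs
  rw [hr, PySem.List.insert_natCast xs r x hrle]
  have htake : ∀ a ∈ xs.take r, a ≤ x := by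
    intro a ha
    obtain ⟨i, hi, rfl⟩ := List.mem_iff_getElem.mp ha
    have hik : i < r := by have := hi; simp [List.length_take] at this; omega
    have hix : i < xs.length := by omega
    have : (xs.take r)[i] = xs[i] := List.getElem_take
    rw [this]; exact h1 i hix hik
  have hdrop : ∀ b ∈ xs.drop r, x < b := by
    intro b hb
    obtain ⟨i, hi, rfl⟩ := List.mem_iff_getElem.mp hb
    have hix : r + i < xs.length := by have := hi; simp [List.length_drop] at this; omega
    have : (xs.drop r)[i] = xs[r + i] := by simp
    rw [this]; exact h2 (r + i) hix (by omega)
  constructor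
  · refine List.pairwise_append.mpr ⟨List.Pairwise.sublist (List.take_sublist ..) hs, ?_, ?_⟩
    · refine List.pairwise_cons.mpr ⟨fun y hy => le_of_lt (hdrop y hy),
        List.Pairwise.sublist (List.drop_sublist ..) hs⟩
    · intro a ha b hb
      rcases List.mem_cons.mp hb with rfl | hb'
      · exact htake a ha
      · exact le_trans (htake a ha) (le_of_lt (hdrop b hb'))
  · exact List.perm_middle.trans (by rw [List.take_append_drop])

-- count difference over filtered endpoint lists = stabbing count
lemma pv_cnt_diff (tl : List (List Int)) (p : Int) :
    ((((tl.filter pvKeep).map pvL).countP (fun v => decide (v ≤ p)) : Int) -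
     (((tl.filter pvKeep).map pvR).countP (fun v => decide (v ≤ p)) : Int)) = pvCnt tl p := by
  induction tl with
  | nil => simp [pvCnt]
  | cons l t ih =>
    unfold pvCnt at ih ⊢
    by_cases hk : pvKeep l = true
    · have hlr : pvL l < pvR l := by simpa [pvKeep] using hk
      simp only [List.filter_cons, hk, ite_true, List.map_cons, List.countP_cons]
      split_ifs <;>
        simp only [decide_eq_true_eq, not_and, not_lt] at * <;>
        push_cast <;> omega
    · have hlr : ¬ pvL l < pvR l := by simpa [pvKeep] using hk
      have hc : ¬ (pvL l ≤ p ∧ p < pvR l) := by rintro ⟨u, v⟩; omega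
      simp only [List.filter_cons, hk, ite_false, Bool.false_eq_true, List.countP_cons, hc]
      simpa [hc] using ih

-- A's inner loop counts both endpoints in one pass
lemma pv_pair_count (tl : List (List Int)) (x y : Int) (p q : Int) :
    tl.foldl
      (fun (ov : Int × Int) lj =>
        ( if PySem.List.pyGetD lj 0 0 ≤ x ∧ x < PySem.List.pyGetD lj 1 0 then ov.1 + 1 else ov.1,
          if PySem.List.pyGetD lj 0 0 ≤ y ∧ y < PySem.List.pyGetD lj 1 0 then ov.2 + 1 else ov.2 ))
      (p, q)
    = (p + (tl.countP (fun l => decide (pvL l ≤ x ∧ x < pvR l)) : Int),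
       q + (tl.countP (fun l => decide (pvL l ≤ y ∧ y < pvR l)) : Int)) := by
  induction tl generalizing p q with
  | nil => simp
  | cons l t ih =>
    simp only [List.foldl_cons]
    rw [ih]
    simp only [List.countP_cons, pvL, pvR, Prod.mk.injEq]
    split_ifs <;>
      simp only [decide_eq_true_eq, not_and, not_lt] at * <;>
      constructor <;> push_cast <;> omega


-- one iteration of B's sweep at row i: updates best by pvF and advances the invariant
lemma pv_stepB (lst : List (List Int)) (i : Nat) (hi : i < lst.length)
    (S E : List Int) (best : Int)
    (hS : S.Pairwise (· ≤ ·)) (hE : E.Pairwise (· ≤ ·))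
    (hSp : S.Perm (((lst.drop (i + 1)).filter pvKeep).map pvL))
    (hEp : E.Perm (((lst.drop (i + 1)).filter pvKeep).map pvR)) :
    ∃ S' E',
      (∀ (rest : List Int),
        List.foldl (fun (st : List Int × List Int × Int) (i : Int) =>
          let starts := st.1
          let ends := st.2.1
          let best := st.2.2
          let li := PySem.List.pyGetD lst i []
          let a := PySem.List.pyGetD li 0 0
          let b := PySem.List.pyGetD li 1 0
          let cl := 1 + pvBR starts a 0 (starts.length : Int) - pvBR ends a 0 (ends.length : Int)
          let cr := 1 + pvBR starts b 0 (starts.length : Int) - pvBR ends b 0 (ends.length : Int)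
          let best := if cl > best then cl else best
          let best := if cr > best then cr else best
          if a < b then
            (PySem.List.insert starts (pvBR starts a 0 (starts.length : Int)) a,
             PySem.List.insert ends (pvBR ends b 0 (ends.length : Int)) b, best)
          else (starts, ends, best)) (S, E, best) ((i : Int) :: rest)
        = List.foldl (fun (st : List Int × List Int × Int) (i : Int) =>
          let starts := st.1
          let ends := st.2.1
          let best := st.2.2
          let li := PySem.List.pyGetD lst i []
          let a := PySem.List.pyGetD li 0 0
          let b := PySem.List.pyGetD li 1 0
          let cl := 1 + pvBR starts a 0 (starts.length : Int) - pvBR ends a 0 (ends.length : Int)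
          let cr := 1 + pvBR starts b 0 (starts.length : Int) - pvBR ends b 0 (ends.length : Int)
          let best := if cl > best then cl else best
          let best := if cr > best then cr else best
          if a < b then
            (PySem.List.insert starts (pvBR starts a 0 (starts.length : Int)) a,
             PySem.List.insert ends (pvBR ends b 0 (ends.length : Int)) b, best)
          else (starts, ends, best)) (S', E', max best (pvF lst (i : Int))) rest) ∧
      S'.Pairwise (· ≤ ·) ∧ E'.Pairwise (· ≤ ·) ∧
      S'.Perm (((lst.drop i).filter pvKeep).map pvL) ∧
      E'.Perm (((lst.drop i).filter pvKeep).map pvR) := by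
  have hli : PySem.List.pyGetD lst (i : Int) [] = lst[i] := by
    rw [PySem.List.pyGetD_natCast, List.getD_eq_getElem _ _ hi]
  have hdropi : lst.drop i = lst[i] :: lst.drop (i + 1) := List.drop_eq_getElem_cons hi
  -- counts computed by the two binary searches
  have hcount : ∀ (p : Int),
      1 + pvBR S p 0 (S.length : Int) - pvBR E p 0 (E.length : Int)
        = 1 + pvCnt (lst.drop (i + 1)) p := by
    intro p
    rw [pvBR_count S p hS, pvBR_count E p hE,
        hSp.countP_eq (fun v => decide (v ≤ p)), hEp.countP_eq (fun v => decide (v ≤ p))]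
    have := pv_cnt_diff (lst.drop (i + 1)) p
    omega
  have hbest : ∀ (cl cr m : Int),
      (if cr > (if cl > m then cl else m) then cr else (if cl > m then cl else m))
        = max m (max cl cr) := by
    intro cl cr m
    simp only [max_def]; split_ifs <;> omega
  have hF : pvF lst (i : Int)
      = max (1 + pvCnt (lst.drop (i + 1)) (pvL lst[i])) (1 + pvCnt (lst.drop (i + 1)) (pvR lst[i])) := by
    unfold pvF
    rw [hli]
    norm_num
  by_cases hab : PySem.List.pyGetD lst[i] 0 0 < PySem.List.pyGetD lst[i] 1 0
  · obtain ⟨hS'pw, hS'perm⟩ := pv_insert_sorted S (PySem.List.pyGetD lst[i] 0 0) hS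
    obtain ⟨hE'pw, hE'perm⟩ := pv_insert_sorted E (PySem.List.pyGetD lst[i] 1 0) hE
    refine ⟨_, _, ?_, hS'pw, hE'pw, ?_, ?_⟩
    · intro rest
      rw [List.foldl_cons]
      congr 1
      show (let starts := S; let ends := E; let best2 := best;
        let li := PySem.List.pyGetD lst (i : Int) [];
        let a := PySem.List.pyGetD li 0 0;
        let b := PySem.List.pyGetD li 1 0;
        let cl := 1 + pvBR starts a 0 (starts.length : Int) - pvBR ends a 0 (ends.length : Int);
        let cr := 1 + pvBR starts b 0 (starts.length : Int) - pvBR ends b 0 (ends.length : Int);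
        let best3 := if cl > best2 then cl else best2;
        let best4 := if cr > best3 then cr else best3;
        if a < b then
          (PySem.List.insert starts (pvBR starts a 0 (starts.length : Int)) a,
           PySem.List.insert ends (pvBR ends b 0 (ends.length : Int)) b, best4)
        else (starts, ends, best4)) = _
      simp only [hli]
      rw [if_pos hab, hcount, hcount, hbest, hF]
      simp [pvL, pvR]
    · refine hS'perm.trans ?_
      rw [hdropi, List.filter_cons, if_pos (by simpa [pvKeep, pvL, pvR] using hab), List.map_cons]
      exact (hSp.cons _)
    · refine hE'perm.trans ?_
      rw [hdropi, List.filter_cons, if_pos (by simpa [pvKeep, pvL, pvR] using hab), List.map_cons]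
      exact (hEp.cons _)
  · refine ⟨S, E, ?_, hS, hE, ?_, ?_⟩
    · intro rest
      rw [List.foldl_cons]
      congr 1
      show (let starts := S; let ends := E; let best2 := best;
        let li := PySem.List.pyGetD lst (i : Int) [];
        let a := PySem.List.pyGetD li 0 0;
        let b := PySem.List.pyGetD li 1 0;
        let cl := 1 + pvBR starts a 0 (starts.length : Int) - pvBR ends a 0 (ends.length : Int);
        let cr := 1 + pvBR starts b 0 (starts.length : Int) - pvBR ends b 0 (ends.length : Int);
        let best3 := if cl > best2 then cl else best2;
        let best4 := if cr > best3 then cr else best3;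
        if a < b then
          (PySem.List.insert starts (pvBR starts a 0 (starts.length : Int)) a,
           PySem.List.insert ends (pvBR ends b 0 (ends.length : Int)) b, best4)
        else (starts, ends, best4)) = _
      simp only [hli]
      rw [if_neg hab, hcount, hcount, hbest, hF]
      simp [pvL, pvR]
    · rw [hdropi, List.filter_cons, if_neg (by simpa [pvKeep, pvL, pvR] using hab)]
      exact hSp
    · rw [hdropi, List.filter_cons, if_neg (by simpa [pvKeep, pvL, pvR] using hab)]
      exact hEp

-- B's sweep: invariant over the processed suffix
lemma pv_loopB (lst : List (List Int)) :
    ∀ (i : Nat), i < lst.length → ∀ (S E : List Int) (best : Int),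
    S.Pairwise (· ≤ ·) → E.Pairwise (· ≤ ·) →
    S.Perm (((lst.drop (i + 1)).filter pvKeep).map pvL) →
    E.Perm (((lst.drop (i + 1)).filter pvKeep).map pvR) →
    ((PySem.List.pyRange (i : Int) (-1) (-1)).foldl
      (fun (st : List Int × List Int × Int) i =>
        let starts := st.1
        let ends := st.2.1
        let best := st.2.2
        let li := PySem.List.pyGetD lst i []
        let a := PySem.List.pyGetD li 0 0
        let b := PySem.List.pyGetD li 1 0
        let cl := 1 + pvBR starts a 0 (starts.length : Int) - pvBR ends a 0 (ends.length : Int)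
        let cr := 1 + pvBR starts b 0 (starts.length : Int) - pvBR ends b 0 (ends.length : Int)
        let best := if cl > best then cl else best
        let best := if cr > best then cr else best
        if a < b then
          (PySem.List.insert starts (pvBR starts a 0 (starts.length : Int)) a,
           PySem.List.insert ends (pvBR ends b 0 (ends.length : Int)) b, best)
        else (starts, ends, best))
      (S, E, best)).2.2
    = List.foldl (fun (m : Int) (k : Nat) => max m (pvF lst (k : Int))) best ((List.range (i + 1)).reverse) := by
  intro i
  induction i with
  | zero =>
    intro hi S E best hS hE hSp hEp
    rw [PySem.List.pyRange_neg_one_cons (by omega : (-1 : Int) < ((0 : Nat) : Int)),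
        PySem.List.pyRange_neg_one_eq_nil (by omega : ((0 : Nat) : Int) - 1 ≤ -1)]
    obtain ⟨S', E', heq, _, _, _, _⟩ := pv_stepB lst 0 hi S E best hS hE hSp hEp
    rw [heq [], List.foldl_nil]
    simp
  | succ i ih =>
    intro hi S E best hS hE hSp hEp
    have hcast : ((i + 1 : Nat) : Int) - 1 = (i : Nat) := by push_cast; ring
    rw [PySem.List.pyRange_neg_one_cons (by push_cast; omega : (-1 : Int) < ((i + 1 : Nat) : Int)),
        hcast]
    obtain ⟨S', E', heq, hS', hE', hSp', hEp'⟩ :=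
      pv_stepB lst (i + 1) hi S E best hS hE hSp hEp
    rw [heq _, ih (by omega) S' E' _ hS' hE' hSp' hEp']
    rw [show List.range (i + 1 + 1) = List.range (i + 1) ++ [i + 1] from List.range_succ,
        List.reverse_append, List.reverse_singleton, List.singleton_append, List.foldl_cons]

-- Python's 'if x > m: m = x'
lemma pv_if_max (m x : Int) : (if x > m then x else m) = max m x := by
  simp only [max_def]; split_ifs <;> omega

lemma pv_max_out (f : Nat → Int) (l : List Nat) (init x : Int) :
    List.foldl (fun (m : Int) (k : Nat) => max m (f k)) (max init x) l
      = max (List.foldl (fun (m : Int) (k : Nat) => max m (f k)) init l) x := by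
  induction l generalizing init with
  | nil => simp
  | cons a t ih => simp only [List.foldl_cons, max_right_comm init x (f a), ih]

-- a running max is insensitive to the traversal order (A sweeps up, B sweeps down)
lemma pv_max_reverse (f : Nat → Int) (l : List Nat) (init : Int) :
    List.foldl (fun (m : Int) (k : Nat) => max m (f k)) init l.reverse
      = List.foldl (fun (m : Int) (k : Nat) => max m (f k)) init l := by
  induction l generalizing init with
  | nil => rfl
  | cons a t ih =>
    rw [List.reverse_cons, List.foldl_append, List.foldl_cons, List.foldl_nil, ih,
        List.foldl_cons, pv_max_out]

-- ===== VERDICT (by name: the statement is the Claim_ definition above) =====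
theorem max_overlapping2_spec : Claim_equal_max_overlapping2 := by
  unfold Claim_equal_max_overlapping2 Spec_max_overlapping2
  intro lst _ _
  unfold max_overlapping2 max_overlapping2_alt
  by_cases hn : lst.length < 2
  · rw [if_pos (by exact_mod_cast hn), PySem.List.pyRange_one_eq_nil (by omega), List.foldl_nil]
  · rw [if_neg (by exact_mod_cast hn)]
    have hn2 : 2 ≤ lst.length := by omega
    -- B's side via the sweep invariant
    have hB : ((PySem.List.pyRange ((lst.length : Int) - 1) (-1) (-1)).foldl
        (fun (st : List Int × List Int × Int) i =>
          let starts := st.1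
          let ends := st.2.1
          let best := st.2.2
          let li := PySem.List.pyGetD lst i []
          let a := PySem.List.pyGetD li 0 0
          let b := PySem.List.pyGetD li 1 0
          let cl := 1 + pvBR starts a 0 (starts.length : Int) - pvBR ends a 0 (ends.length : Int)
          let cr := 1 + pvBR starts b 0 (starts.length : Int) - pvBR ends b 0 (ends.length : Int)
          let best := if cl > best then cl else best
          let best := if cr > best then cr else best
          if a < b then
            (PySem.List.insert starts (pvBR starts a 0 (starts.length : Int)) a,
             PySem.List.insert ends (pvBR ends b 0 (ends.length : Int)) b, best)
          else (starts, ends, best))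
        ([], [], 1)).2.2
        = List.foldl (fun (m : Int) (k : Nat) => max m (pvF lst (k : Int))) 1
            ((List.range lst.length).reverse) := by
      have hcast : ((lst.length - 1 : Nat) : Int) = (lst.length : Int) - 1 := by omega
      rw [← hcast]
      have := pv_loopB lst (lst.length - 1) (by omega) [] [] 1 (by simp) (by simp)
        (by rw [show lst.length - 1 + 1 = lst.length by omega]; simp) 
        (by rw [show lst.length - 1 + 1 = lst.length by omega]; simp)
      rw [this, show lst.length - 1 + 1 = lst.length by omega]
    rw [hB, pv_max_reverse,
        show List.range lst.length = List.range (lst.length - 1) ++ [lst.length - 1] by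
          rw [← List.range_succ]; congr 1; omega,
        List.foldl_append, List.foldl_cons, List.foldl_nil]
    -- the last row has no later rows: its contribution is 1 and is absorbed
    have hlast : pvF lst ((lst.length - 1 : Nat) : Int) = 1 := by
      unfold pvF
      rw [show (((lst.length - 1 : Nat) : Int) + 1).toNat = lst.length by omega]
      simp [pvCnt]
    have hge := (PySem.List.le_foldl_max_int (List.range (lst.length - 1))
        (fun k => pvF lst (k : Int)) 1).1
    rw [hlast, show max (List.foldl (fun (m : Int) (k : Nat) => max m (pvF lst (k : Int))) 1
          (List.range (lst.length - 1))) 1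
        = List.foldl (fun (m : Int) (k : Nat) => max m (pvF lst (k : Int))) 1
          (List.range (lst.length - 1)) from max_eq_left (le_trans (by norm_num) hge)]
    -- A's side: rewrite the inner loop of each iteration to pvF
    have hA : ∀ (m i : Int), 0 ≤ i → i < (lst.length : Int) - 1 →
        (let ov := (PySem.List.pyRange (i + 1) (lst.length : Int) 1).foldl
          (fun (ov : Int × Int) j =>
            let lj := PySem.List.pyGetD lst j []
            ( if PySem.List.pyGetD lj 0 0 ≤ PySem.List.pyGetD (PySem.List.pyGetD lst i []) 0 0 ∧
                 PySem.List.pyGetD (PySem.List.pyGetD lst i []) 0 0 < PySem.List.pyGetD lj 1 0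
              then ov.1 + 1 else ov.1,
              if PySem.List.pyGetD lj 0 0 ≤ PySem.List.pyGetD (PySem.List.pyGetD lst i []) 1 0 ∧
                 PySem.List.pyGetD (PySem.List.pyGetD lst i []) 1 0 < PySem.List.pyGetD lj 1 0
              then ov.2 + 1 else ov.2 ))
          (1, 1)
        if max ov.1 ov.2 > m then max ov.1 ov.2 else m)
        = max m (pvF lst i) := by
      intro m i h0 h1
      have hlen : (lst.length : Int) = PySem.List.len lst := by simp [PySem.List.len_eq]
      simp only []
      rw [hlen, PySem.List.foldl_pyRange_pyGetD lst []
            (fun (ov : Int × Int) lj =>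
              ( if PySem.List.pyGetD lj 0 0 ≤ PySem.List.pyGetD (PySem.List.pyGetD lst i []) 0 0 ∧
                   PySem.List.pyGetD (PySem.List.pyGetD lst i []) 0 0 < PySem.List.pyGetD lj 1 0
                then ov.1 + 1 else ov.1,
                if PySem.List.pyGetD lj 0 0 ≤ PySem.List.pyGetD (PySem.List.pyGetD lst i []) 1 0 ∧
                   PySem.List.pyGetD (PySem.List.pyGetD lst i []) 1 0 < PySem.List.pyGetD lj 1 0
                then ov.2 + 1 else ov.2 ))
            (1, 1) (by omega : (0 : Int) ≤ i + 1),
          pv_pair_count]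
      rw [pv_if_max]
      unfold pvF pvCnt pvL pvR
      norm_num
    rw [PySem.List.foldl_congr_mem _ _
          (fun (m i : Int) => max m (pvF lst i)) 1
          (fun m i hmem => by
            obtain ⟨h0, h1⟩ := (PySem.List.mem_pyRange_one).mp hmem
            exact hA m i h0 h1)]
    -- index list: range over Int = cast of range over Nat
    have hidx : PySem.List.pyRange 0 ((lst.length : Int) - 1) 1
        = (List.range (lst.length - 1)).map (fun (k : Nat) => (k : Int)) := by
      rw [show (lst.length : Int) - 1 = ((lst.length - 1 : Nat) : Int) by omega]
      exact_mod_cast PySem.List.pyRange_zero_natCast (lst.length - 1)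
    rw [hidx, List.foldl_map]
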